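-- pv_equiv track=rewrite | github.com/ElectionLens/ElectionLens | scripts/extract-2024-text.py | create_party_mapping
-- ===== SOURCE A (Python) =====
-- def create_party_mapping(pdf_parties: list, pc_candidates: list) -> dict:
--     """Create mapping from PDF column index to PC candidate index."""
--     mapping = {}
--     pc_party_idx = {}
--
--     # Map PC candidates by party
--     for i, c in enumerate(pc_candidates):
--         party = c.get('party', 'IND')
--         if party not in pc_party_idx:
--             pc_party_idx[party] = []
--         pc_party_idx[party].append(i)
--
--     # Create mapping
--     party_used = {}
--     for pdf_idx, party in enumerate(pdf_parties):
--         if party in pc_party_idx: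
--             # Get next unused PC candidate with same party
--             used_count = party_used.get(party, 0)
--             if used_count < len(pc_party_idx[party]):
--                 pc_idx = pc_party_idx[party][used_count]
--                 mapping[pdf_idx] = pc_idx
--                 party_used[party] = used_count + 1
--
--     return mapping
-- ===== SOURCE B (Python) =====
-- def create_party_mapping(pdf_parties: list, pc_candidates: list) -> dict:
--     """Create mapping from PDF column index to PC candidate index."""
--     pc_by_party = {}
--     for i, c in enumerate(pc_candidates):
--         pc_by_party.setdefault(c.get('party', 'IND'), []).append(i)
--     pdf_by_party = {}
--     for i, p in enumerate(pdf_parties):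
--         pdf_by_party.setdefault(p, []).append(i)
--     pairs = []
--     for party, pcs in pc_by_party.items():
--         pairs.extend(zip(pdf_by_party.get(party, []), pcs))
--     pairs.sort(key=lambda q: q[0])
--     return dict(pairs)
-- ===== Notes on version B (the rewrite author's own statement) =====
-- stated objective: alternative
-- what changed: A streams once over pdf_parties keeping a mutable per-party used counter to pick the next PC index; B instead groups BOTH sides by party (pc indices and pdf column indices), pairs each party's two index lists with zip (zip's truncation reproduces A's used_count<len cutoff), then sorts the collected pairs by pdf index and builds the dict from them.
import Mathlib
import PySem

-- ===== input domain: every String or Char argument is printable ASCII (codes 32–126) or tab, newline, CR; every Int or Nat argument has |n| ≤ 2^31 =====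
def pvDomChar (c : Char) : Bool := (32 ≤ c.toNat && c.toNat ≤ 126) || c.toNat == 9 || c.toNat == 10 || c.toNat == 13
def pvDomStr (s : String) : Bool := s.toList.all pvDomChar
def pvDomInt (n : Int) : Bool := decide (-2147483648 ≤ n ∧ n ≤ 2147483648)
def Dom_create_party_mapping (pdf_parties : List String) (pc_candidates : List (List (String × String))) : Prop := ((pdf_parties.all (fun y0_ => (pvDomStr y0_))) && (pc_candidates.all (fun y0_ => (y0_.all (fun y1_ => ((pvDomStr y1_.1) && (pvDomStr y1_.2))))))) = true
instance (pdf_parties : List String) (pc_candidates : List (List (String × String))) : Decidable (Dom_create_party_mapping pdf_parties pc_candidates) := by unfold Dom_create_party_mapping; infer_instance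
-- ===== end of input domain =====

-- B replaces A's streaming pass with per-party used counters by a group-both-sides-then-zip pairing,
-- sorted by pdf index and rebuilt into a dict (objective: alternative; same result, different algorithm).

-- ===== PORT A =====
-- first pass of A: party -> list of PC candidate indices (if-not-in insert [], then append)
def pvGroupByParty (pc_candidates : List (List (String × String))) : PySem.Dict String (List Int) :=
  (PySem.List.enumerate pc_candidates 0).foldl
    (fun d ic =>
      let party := PySem.Dict.getD (PySem.Dict.mk ic.2) "party" "IND"
      let d' := if d.contains party then d else d.insert party []
      d'.modify party [] (fun l => l ++ [ic.1]))
    PySem.Dict.empty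

def create_party_mapping (pdf_parties : List String) (pc_candidates : List (List (String × String))) : List (Int × Int) :=
  let pc_party_idx := pvGroupByParty pc_candidates
  -- second loop: state = (mapping, party_used)
  let final := (PySem.List.enumerate pdf_parties 0).foldl
    (fun (st : PySem.Dict Int Int × PySem.Dict String Int) ip =>
      if pc_party_idx.contains ip.2 then
        let lst := pc_party_idx.getD ip.2 []   -- key present: getD = pc_party_idx[party]
        let used_count := st.2.getD ip.2 0
        if used_count < (lst.length : Int) then
          (st.1.insert ip.1 (PySem.List.pyGetD lst used_count 0),
           st.2.insert ip.2 (used_count + 1))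
        else st
      else st)
    (PySem.Dict.empty, PySem.Dict.empty)
  final.1.items

-- ===== PORT B =====
-- 'd.setdefault(k, []).append(i)' is exactly 'd.modify k [] (· ++ [i])': same value, key appended when absent
def create_party_mapping_alt (pdf_parties : List String) (pc_candidates : List (List (String × String))) : List (Int × Int) :=
  let pc_by_party := (PySem.List.enumerate pc_candidates 0).foldl
    (fun d ic => d.modify (PySem.Dict.getD (PySem.Dict.mk ic.2) "party" "IND") [] (fun l => l ++ [ic.1]))
    PySem.Dict.empty
  let pdf_by_party := (PySem.List.enumerate pdf_parties 0).foldl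
    (fun d ip => d.modify ip.2 [] (fun l => l ++ [ip.1]))
    PySem.Dict.empty
  let pairs := pc_by_party.items.foldl
    (fun acc kv => acc ++ (pdf_by_party.getD kv.1 []).zip kv.2) []
  let sortedPairs := PySem.List.sorted pairs (fun q => q.1)
  (sortedPairs.foldl (fun (d : PySem.Dict Int Int) q => d.insert q.1 q.2) PySem.Dict.empty).items

-- ===== PRECONDITION & SPEC =====
def Spec_create_party_mapping (pdf_parties : List String) (pc_candidates : List (List (String × String))) (out : List (Int × Int)) : Prop := out = create_party_mapping_alt pdf_parties pc_candidates
instance (pdf_parties : List String) (pc_candidates : List (List (String × String))) (out : List (Int × Int)) : Decidable (Spec_create_party_mapping pdf_parties pc_candidates out) := by unfold Spec_create_party_mapping; infer_instance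

-- ===== CLAIM (what is proved, stated in full; the proofs are below) =====
def Claim_equal_create_party_mapping : Prop := ∀ (pdf_parties : List String) (pc_candidates : List (List (String × String))), Dom_create_party_mapping pdf_parties pc_candidates → Spec_create_party_mapping pdf_parties pc_candidates (create_party_mapping pdf_parties pc_candidates)

-- ===== LEMMAS AND PROOFS =====

-- canonical recursive form of A's second loop: walk the suffix r, pre is the processed prefix
def pvGo (pc : PySem.Dict String (List Int)) (pre r : List String) : List (Int × Int) :=
  match r with
  | [] => []
  | p :: r' =>
    match pc.get? p with
    | some lst =>
      if pre.count p < lst.length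
      then ((pre.length : Int), lst.getD (pre.count p) 0) :: pvGo pc (pre ++ [p]) r'
      else pvGo pc (pre ++ [p]) r'
    | none => pvGo pc (pre ++ [p]) r'

-- pdf column indices carrying party p, in order
def pvIdxs (pdf : List String) (p : String) : List Int :=
  ((PySem.List.enumerate pdf 0).filter (fun ip => ip.2 == p)).map (fun ip => ip.1)

-- ---- A reduces to pvGo ----
theorem pvA_eq_go (pc : PySem.Dict String (List Int)) :
    ∀ (r pre : List String) (m : PySem.Dict Int Int) (u : PySem.Dict String Int),
      (∀ q ∈ m.items, q.1 < (pre.length : Int)) →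
      (∀ p lst, pc.get? p = some lst → u.getD p 0 = min ((pre.count p : Int)) ((lst.length : Int))) →
      (((PySem.List.enumerate r (pre.length : Int)).foldl
        (fun (st : PySem.Dict Int Int × PySem.Dict String Int) ip =>
          if pc.contains ip.2 then
            let lst := pc.getD ip.2 []
            let used_count := st.2.getD ip.2 0
            if used_count < (lst.length : Int) then
              (st.1.insert ip.1 (PySem.List.pyGetD lst used_count 0),
               st.2.insert ip.2 (used_count + 1))
            else st
          else st)
        (m, u)).1).items = m.items ++ pvGo pc pre r := by
  intro r
  induction r with
  | nil => intro pre m u _ _; simp [pvGo, PySem.List.enumerate_nil]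
  | cons p r' ih =>
    intro pre m u hm hu
    have hn : (pre.length : Int) + 1 = (((pre ++ [p]).length : Nat) : Int) := by simp
    rw [PySem.List.enumerate_cons, List.foldl_cons, hn]
    cases hpc : pc.get? p with
    | none =>
      have hcon : pc.contains p = false := by
        rw [PySem.Dict.contains_eq_isSome_get?, hpc]; rfl
      simp only [hcon, Bool.false_eq_true, if_false]
      rw [ih (pre ++ [p]) m u (by intro q hq; have := hm q hq; simp; omega)
            (by intro q lstq hq; rw [hu q lstq hq]
                have hne : p ≠ q := by intro h; rw [← h, hpc] at hq; cases hq
                simp [List.count_append, hne])]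
      simp [pvGo, hpc]
    | some lst =>
      have hcon : pc.contains p = true := by
        rw [PySem.Dict.contains_eq_isSome_get?, hpc]; rfl
      have hgetD : pc.getD p [] = lst := PySem.Dict.getD_of_get?_eq_some _ _ hpc
      have huse : u.getD p 0 = min ((pre.count p : Int)) ((lst.length : Int)) := hu p lst hpc
      simp only [hcon, if_true, hgetD, huse]
      by_cases hc : pre.count p < lst.length
      · have hmin : min ((pre.count p : Int)) ((lst.length : Int)) = ((pre.count p : Nat) : Int) := by omega
        have hc' : ((pre.count p : Nat) : Int) < ((lst.length : Nat) : Int) := by exact_mod_cast hc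
        rw [hmin, if_pos hc']
        have hm' : ∀ q ∈ (m.insert ((pre.length : Nat) : Int) (PySem.List.pyGetD lst ((pre.count p : Nat) : Int) 0)).items, q.1 < (((pre ++ [p]).length : Nat) : Int) := by
          intro q hq
          rw [PySem.Dict.items_insert_of_not_contains] at hq
          · rcases List.mem_append.1 hq with h | h
            · have := hm q h; simp; omega
            · simp at h; subst h; simp
          · rw [PySem.Dict.contains_eq_decide_mem_keys]
            simp only [decide_eq_false_iff_not, PySem.Dict.keys, List.mem_map]
            rintro ⟨q, hq, hq1⟩
            have := hm q hq
            omega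
        have hu' : ∀ q lstq, pc.get? q = some lstq → (u.insert p (((pre.count p : Nat) : Int) + 1)).getD q 0 = min ((((pre ++ [p]).count q : Nat) : Int)) ((lstq.length : Int)) := by
          intro q lstq hq
          rw [PySem.Dict.getD_insert]
          by_cases hqp : q = p
          · subst hqp
            rw [hq] at hpc; cases hpc
            rw [if_pos rfl]
            simp [List.count_append]
            omega
          · rw [if_neg hqp, hu q lstq hq]
            simp [List.count_append, Ne.symm hqp]
        rw [ih (pre ++ [p]) _ _ hm' hu']
        simp only [pvGo, hpc, if_pos hc]
        rw [PySem.Dict.items_insert_of_not_contains]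
        · simp only [List.append_assoc, List.cons_append, List.nil_append]
          congr 3
          rw [PySem.List.pyGetD_natCast]
        · rw [PySem.Dict.contains_eq_decide_mem_keys]
          simp only [decide_eq_false_iff_not, PySem.Dict.keys, List.mem_map]
          rintro ⟨q, hq, hq1⟩
          have := hm q hq
          omega
      · have hge : ¬ (min ((pre.count p : Int)) ((lst.length : Int)) < (lst.length : Int)) := by omega
        simp only [if_neg hge]
        rw [ih (pre ++ [p]) m u (by intro q hq; have := hm q hq; simp; omega)
              (by intro q lstq hq
                  by_cases hqp : q = p
                  · subst hqp; rw [hq] at hpc; cases hpc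
                    rw [hu _ _ hq]
                    simp [List.count_append]
                    omega
                  · rw [hu q lstq hq]
                    simp [List.count_append, Ne.symm hqp])]
        simp [pvGo, hpc, hc]

-- ---- the two grouping folds build the same dict ----
theorem pvStep_eq (d : PySem.Dict String (List Int)) (k : String) (f : List Int → List Int) (h : d.contains k = false) :
    (d.insert k []).modify k [] f = d.modify k [] f := by
  have hk : ∀ p ∈ d.items, p.1 ≠ k := by
    intro p hp hpk
    have hc : d.contains k = true := by
      rw [PySem.Dict.contains_eq_decide_mem_keys]
      simp only [decide_eq_true_eq, PySem.Dict.keys, List.mem_map]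
      exact ⟨p, hp, hpk⟩
    rw [hc] at h; cases h
  have hg : (d.insert k []).getD k [] = [] := PySem.Dict.getD_insert_self d k [] []
  simp [PySem.Dict.modify, PySem.Dict.insert, h] at hg ⊢
  rw [hg]
  rw [PySem.Dict.getD_of_not_contains _ _ h]
  refine ⟨?_, rfl⟩
  rw [List.map_congr_left ?_, List.map_id]
  intro p hp
  simp [hk p hp]

theorem pvGroup_eq (pc_candidates : List (List (String × String))) :
    (PySem.List.enumerate pc_candidates 0).foldl
      (fun d ic => d.modify (PySem.Dict.getD (PySem.Dict.mk ic.2) "party" "IND") [] (fun l => l ++ [ic.1]))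
      PySem.Dict.empty = pvGroupByParty pc_candidates := by
  unfold pvGroupByParty
  congr 1
  funext d ic
  by_cases h : d.contains (PySem.Dict.getD (PySem.Dict.mk ic.2) "party" "IND")
  · simp only [h, if_true]
  · simp only [eq_false_of_ne_true h, Bool.false_eq_true, if_false]
    exact (pvStep_eq d _ _ (eq_false_of_ne_true h)).symm

-- ---- B's pdf grouping: getD = pvIdxs ----
theorem pvPdfGroup_getD (pdf : List String) (c : String) :
    ((PySem.List.enumerate pdf 0).foldl
      (fun d ip => d.modify ip.2 [] (fun l => l ++ [ip.1])) PySem.Dict.empty).getD c []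
    = pvIdxs pdf c := by
  have h1 : (PySem.List.enumerate pdf 0).foldl
      (fun d ip => d.modify ip.2 [] (fun l => l ++ [ip.1])) PySem.Dict.empty
      = ((PySem.List.enumerate pdf 0).map Prod.swap).foldl
          (fun d p => d.modify p.1 [] (fun l => l ++ [p.2])) PySem.Dict.empty := by
    rw [List.foldl_map]
    rfl
  rw [h1, PySem.Dict.getD_foldl_modify_append, PySem.Dict.getD_empty]
  unfold pvIdxs
  rw [List.filter_map, List.map_map]
  simp only [Function.comp_def, Prod.snd_swap, Prod.fst_swap]
  rw [List.nil_append]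

-- ---- pvIdxs facts ----
theorem pvIdxs_len (p : String) : ∀ (pdf : List String) (s : Int),
    (((PySem.List.enumerate pdf s).filter (fun ip => ip.2 == p)).map (fun ip => ip.1)).length = pdf.count p := by
  intro pdf
  induction pdf with
  | nil => intro s; simp [PySem.List.enumerate_nil]
  | cons q r ih =>
    intro s
    rw [PySem.List.enumerate_cons, List.filter_cons]
    by_cases h : q = p
    · subst h; simp [ih]
    · simp [h, ih]

theorem pvIdxs_append (pdf : List String) (p q : String) :
    pvIdxs (pdf ++ [p]) q = pvIdxs pdf q ++ (if p = q then [((pdf.length : Nat) : Int)] else []) := by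
  unfold pvIdxs
  rw [PySem.List.enumerate_append]
  simp only [List.filter_append, List.map_append]
  congr 1
  by_cases h : p = q
  · subst h; simp [PySem.List.enumerate_cons, PySem.List.enumerate_nil]
  · simp [PySem.List.enumerate_cons, PySem.List.enumerate_nil, h]

-- ---- zip with one appended element ----
theorem pvZip_append_singleton (a : Int) : ∀ (l1 l2 : List Int),
    (l1 ++ [a]).zip l2 = l1.zip l2 ++ (if l1.length < l2.length then [(a, l2.getD l1.length 0)] else []) := by
  intro l1
  induction l1 with
  | nil => intro l2; cases l2 <;> simp
  | cons x r ih =>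
    intro l2
    cases l2 with
    | nil => simp
    | cons y t => simp [ih t]

-- ---- pvGo: appending one party to the pdf list appends at most one pair ----
def pvTail (pc : PySem.Dict String (List Int)) (l : List String) (p : String) : List (Int × Int) :=
  match pc.get? p with
  | some lst => if l.count p < lst.length then [((l.length : Int), lst.getD (l.count p) 0)] else []
  | none => []

theorem pvGo_append (pc : PySem.Dict String (List Int)) (p : String) :
    ∀ (r pre : List String), pvGo pc pre (r ++ [p]) = pvGo pc pre r ++ pvTail pc (pre ++ r) p := by
  intro r
  induction r with
  | nil =>
    intro pre
    simp only [List.nil_append, List.append_nil, pvGo, pvTail]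
  | cons q r' ih =>
    intro pre
    simp only [List.cons_append, pvGo]
    have := ih (pre ++ [q])
    cases hpc : pc.get? q with
    | none => rw [this]; simp
    | some lst =>
      by_cases h : pre.count q < lst.length
      · simp only [h, if_true, this]; simp
      · simp only [h, if_false, this]; simp

-- ---- pvGo is strictly increasing in the pdf index and bounded below ----
theorem pvGo_bounded (pc : PySem.Dict String (List Int)) :
    ∀ (r pre : List String),
      (∀ q ∈ pvGo pc pre r, (pre.length : Int) ≤ q.1) ∧
      (pvGo pc pre r).Pairwise (fun a b => a.1 < b.1) := by
  intro r
  induction r with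
  | nil => intro pre; simp [pvGo]
  | cons p r' ih =>
    intro pre
    have hlen : ((pre.length : Nat) : Int) < (((pre ++ [p]).length : Nat) : Int) := by simp
    obtain ⟨hb, hp⟩ := ih (pre ++ [p])
    simp only [pvGo]
    cases hpc : pc.get? p with
    | none =>
      exact ⟨fun q hq => le_trans (le_of_lt hlen) (hb q hq), hp⟩
    | some lst =>
      by_cases h : pre.count p < lst.length
      · simp only [h, if_true]
        refine ⟨?_, ?_⟩
        · intro q hq
          rcases List.mem_cons.1 hq with h' | h'
          · subst h'; simp
          · exact le_trans (le_of_lt hlen) (hb q h')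
        · exact List.Pairwise.cons (fun q hq => lt_of_lt_of_le hlen (hb q hq)) hp
      · simp only [h, if_false]
        exact ⟨fun q hq => le_trans (le_of_lt hlen) (hb q hq), hp⟩

-- ---- flatMap of pointwise-appended functions, as a permutation ----
theorem pvFlatMap_append_perm {α β : Type} (f g : α → List β) :
    ∀ (l : List α), (l.flatMap (fun x => f x ++ g x)).Perm (l.flatMap f ++ l.flatMap g) := by
  intro l
  induction l with
  | nil => simp
  | cons x r ih =>
    simp only [List.flatMap_cons, List.append_assoc]
    refine List.Perm.append_left (f x) ?_
    exact (List.Perm.append_left (g x) ih).trans (List.perm_append_comm_assoc _ _ _)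

-- ---- flatMap of an at-one-key function over an assoc list with nodup keys is a lookup ----
theorem pvFlatMap_single (p : String) (h : List Int → List (Int × Int)) :
    ∀ (L : List (String × List Int)), (L.map Prod.fst).Nodup →
      L.flatMap (fun kv => if kv.1 = p then h kv.2 else []) =
        (match (PySem.Dict.mk L).get? p with
         | some lst => h lst
         | none => []) := by
  intro L
  induction L with
  | nil => intro _; simp [PySem.Dict.get?]
  | cons kv rest ih =>
    intro hnd
    simp only [List.map_cons, List.nodup_cons] at hnd
    obtain ⟨hk, hnd'⟩ := hnd
    rw [List.flatMap_cons, PySem.Dict.get?_mk_cons]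
    by_cases hkp : kv.1 = p
    · have hrest : rest.flatMap (fun kv => if kv.1 = p then h kv.2 else []) = [] := by
        rw [List.flatMap_eq_nil_iff]
        intro q hq
        have : q.1 ≠ p := by
          intro hqp
          exact hk (by rw [hkp, ← hqp]; exact List.mem_map_of_mem hq)
        simp [this]
      simp [hkp, hrest]
    · simp only [hkp, if_false, List.nil_append]
      rw [ih hnd']
      have : (kv.1 == p) = false := by simp [hkp]
      simp [this]

theorem pvFlatMap_single_dict (p : String) (h : List Int → List (Int × Int))
    (d : PySem.Dict String (List Int)) (hnd : d.keys.Nodup) :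
    d.items.flatMap (fun kv => if kv.1 = p then h kv.2 else []) =
      (match d.get? p with
       | some lst => h lst
       | none => []) := by
  obtain ⟨L⟩ := d
  exact pvFlatMap_single p h L hnd

-- ---- B's pair list is a permutation of pvGo ----
theorem pvPairs_perm (pc : PySem.Dict String (List Int)) (hnd : pc.keys.Nodup) :
    ∀ (pdf : List String),
      (pc.items.flatMap (fun kv => (pvIdxs pdf kv.1).zip kv.2)).Perm (pvGo pc [] pdf) := by
  intro pdf
  induction pdf using List.reverseRecOn with
  | nil =>
    have : ∀ kv ∈ pc.items, (pvIdxs [] kv.1).zip kv.2 = [] := by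
      intro kv _; simp [pvIdxs, PySem.List.enumerate_nil]
    rw [List.flatMap_eq_nil_iff.2 (by intro q hq; exact this q hq)]
    simp [pvGo]
  | append_singleton pdf p ih =>
    have hsplit : ∀ kv : String × List Int,
        (pvIdxs (pdf ++ [p]) kv.1).zip kv.2 =
          (pvIdxs pdf kv.1).zip kv.2 ++
            (if kv.1 = p then
              (if (pvIdxs pdf p).length < kv.2.length
               then [(((pdf.length : Nat) : Int), kv.2.getD (pvIdxs pdf p).length 0)] else [])
             else []) := by
      intro kv
      rw [pvIdxs_append]
      by_cases h : kv.1 = p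
      · rw [if_pos h.symm, pvZip_append_singleton, if_pos h, h]
      · rw [if_neg (fun hh => h hh.symm), List.append_nil, if_neg h, List.append_nil]
    have h1 : (pc.items.flatMap (fun kv => (pvIdxs (pdf ++ [p]) kv.1).zip kv.2)).Perm
        (pc.items.flatMap (fun kv => (pvIdxs pdf kv.1).zip kv.2) ++
         pc.items.flatMap (fun kv => if kv.1 = p then
              (if (pvIdxs pdf p).length < kv.2.length
               then [(((pdf.length : Nat) : Int), kv.2.getD (pvIdxs pdf p).length 0)] else [])
             else [])) := by
      rw [List.flatMap_congr ?_]
      · exact pvFlatMap_append_perm _ _ pc.items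
      · intro kv _; exact hsplit kv
    have hlen : (pvIdxs pdf p).length = pdf.count p := pvIdxs_len p pdf 0
    have h2 : pc.items.flatMap (fun kv => if kv.1 = p then
              (if (pvIdxs pdf p).length < kv.2.length
               then [(((pdf.length : Nat) : Int), kv.2.getD (pvIdxs pdf p).length 0)] else [])
             else []) = pvTail pc pdf p := by
      rw [pvFlatMap_single_dict p
        (fun lst => if (pvIdxs pdf p).length < lst.length
          then [(((pdf.length : Nat) : Int), lst.getD (pvIdxs pdf p).length 0)] else []) pc hnd]
      unfold pvTail
      cases pc.get? p with
      | none => rfl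
      | some lst => rw [hlen]
    rw [pvGo_append pc p pdf []]
    simp only [List.nil_append]
    exact h1.trans (by rw [h2]; exact List.Perm.append ih (List.Perm.refl _))
    
-- ===== VERDICT (by name: the statement is the Claim_ definition above) =====
theorem create_party_mapping_spec : Claim_equal_create_party_mapping := by
  intro pdf pc _
  unfold Spec_create_party_mapping create_party_mapping create_party_mapping_alt
  rw [pvGroup_eq]
  -- A's side: items of the streaming fold = pvGo
  have hA := pvA_eq_go (pvGroupByParty pc) pdf [] PySem.Dict.empty PySem.Dict.empty
    (by intro q hq; simp [PySem.Dict.empty] at hq)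
    (by intro p lst _; simp [PySem.Dict.getD_empty, Nat.cast_nonneg])
  simp only [List.length_nil, Nat.cast_zero] at hA
  -- B's side
  have hnd : (pvGroupByParty pc).keys.Nodup := by
    rw [← pvGroup_eq]
    exact PySem.Dict.nodup_keys_foldl_modify_key _ _ _ _ _ PySem.Dict.nodup_keys_empty
  have hpairs : (PySem.Dict.items (pvGroupByParty pc)).foldl
      (fun acc kv => acc ++ ((((PySem.List.enumerate pdf 0).foldl
        (fun d ip => d.modify ip.2 [] (fun l => l ++ [ip.1])) PySem.Dict.empty).getD kv.1 []).zip kv.2)) []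
      = (pvGroupByParty pc).items.flatMap (fun kv => (pvIdxs pdf kv.1).zip kv.2) := by
    rw [PySem.List.foldl_append_eq_flatMap]
    rw [List.nil_append]
    apply List.flatMap_congr
    intro kv _
    rw [pvPdfGroup_getD]
  have hperm := pvPairs_perm (pvGroupByParty pc) hnd pdf
  obtain ⟨_, hpw⟩ := pvGo_bounded (pvGroupByParty pc) pdf []
  have hsorted : PySem.List.sorted
      ((pvGroupByParty pc).items.flatMap (fun kv => (pvIdxs pdf kv.1).zip kv.2)) (fun q => q.1)
      = pvGo (pvGroupByParty pc) [] pdf :=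
    PySem.List.sorted_eq_of_perm_of_pairwise_lt _ _ _ hperm.symm hpw
  have hfst : ((pvGo (pvGroupByParty pc) [] pdf).map Prod.fst).Nodup :=
    List.pairwise_map.mpr (hpw.imp (fun h => ne_of_lt h))
  have hdict := PySem.Dict.items_foldl_insert_fresh (pvGo (pvGroupByParty pc) [] pdf)
      Prod.fst Prod.snd PySem.Dict.empty
      (by intro a _; exact PySem.Dict.contains_empty _) hfst
  simp only [hpairs, hsorted, hA]
  rw [hdict]
  simp [PySem.Dict.empty]
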